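-- pv_equiv track=rewrite | github.com/MariaMsu/Info_Search | HW_5/model_error.py | bi_symbols
-- ===== SOURCE A (Python) =====
-- def bi_symbols(string):
--     if not string:
--         return []
--         # return ["^_"]
--     new_string = ["^" + string[0]]
--     for i in range(len(string) - 1):
--         new_string += [string[i:i + 2]]
--     new_string += [string[-1:] + "_"]
--     return new_string
-- ===== SOURCE B (Python) =====
-- def bi_symbols(string):
--     if not string:
--         return []
--     out = []
--     prev = "^"
--     for ch in string:
--         out.append(prev + ch)
--         prev = ch
--     out.append(prev + "_")
--     return out
-- ===== Notes on version B (the rewrite author's own statement) =====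
-- stated objective: simpler
-- what changed: B replaces A's three-part slice construction (special '^'+string[0] head, an index loop taking string[i:i+2] slices, special string[-1:]+'_' tail) with a single character-iteration pass carrying the previous character in an accumulator: no indexing or slicing at all, and both boundary bigrams fall out of the accumulator's initial state '^' and a final flush with '_'.
import Mathlib
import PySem

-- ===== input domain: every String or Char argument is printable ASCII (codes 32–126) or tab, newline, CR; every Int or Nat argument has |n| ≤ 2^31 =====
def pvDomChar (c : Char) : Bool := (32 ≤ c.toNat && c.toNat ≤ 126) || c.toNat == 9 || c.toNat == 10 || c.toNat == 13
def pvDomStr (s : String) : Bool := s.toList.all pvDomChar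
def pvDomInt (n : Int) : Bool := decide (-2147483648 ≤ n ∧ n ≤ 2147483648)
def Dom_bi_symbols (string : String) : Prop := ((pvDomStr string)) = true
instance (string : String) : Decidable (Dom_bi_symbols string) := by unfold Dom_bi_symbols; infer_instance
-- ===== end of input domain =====

-- B replaces A's three-part slice construction with one character pass carrying the
-- previous character in an accumulator (no indexing/slicing); objective: simpler.


-- ===== PORT A =====
def bi_symbols (string : String) : List String :=
  if string.toList = [] then []
  else
    let cs := string.toList
    let new_string : List String := [String.ofList ['^', PySem.List.pyGetD cs 0 ' ']]
    let new_string := (PySem.List.pyRange 0 ((cs.length : Int) - 1) 1).foldl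
      (fun acc i => acc ++ [String.ofList (PySem.List.slice cs (some i) (some (i + 2)))]) new_string
    new_string ++ [String.ofList (PySem.List.slice cs (some (-1)) none ++ ['_'])]

-- ===== PORT B =====
def bi_symbols_alt (string : String) : List String :=
  if string.toList = [] then []
  else
    let st := string.toList.foldl
      (fun (st : List String × Char) ch => (st.1 ++ [String.ofList [st.2, ch]], ch))
      ([], '^')
    st.1 ++ [String.ofList [st.2, '_']]

-- ===== PRECONDITION & SPEC =====
def Spec_bi_symbols (string : String) (out : List String) : Prop := out = bi_symbols_alt string
instance (string : String) (out : List String) : Decidable (Spec_bi_symbols string out) := by unfold Spec_bi_symbols; infer_instance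

-- ===== CLAIM (what is proved, stated in full; the proofs are below) =====
def Claim_equal_bi_symbols : Prop := ∀ (string : String), Dom_bi_symbols string → Spec_bi_symbols string (bi_symbols string)

-- ===== LEMMAS AND PROOFS =====

/-- All consecutive bigrams of a character list, as a structural recursion. -/
def pvWindows : List Char → List String
  | a :: b :: rest => String.ofList [a, b] :: pvWindows (b :: rest)
  | _ => []

theorem pvMapRange_eq_windows (ys : List Char) :
    (List.range (ys.length - 1)).map (fun k => String.ofList ((ys.drop k).take 2)) = pvWindows ys := by
  induction ys with
  | nil => simp [pvWindows]
  | cons a t ih =>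
    cases t with
    | nil => simp [pvWindows]
    | cons b r =>
      rw [pvWindows, ← ih]
      have hlen : (a :: b :: r).length - 1 = (b :: r).length - 1 + 1 := by simp
      rw [hlen, List.range_succ_eq_map, List.map_cons, List.map_map]
      congr 1

theorem pvSliceRange_eq_windows (ys : List Char) :
    (PySem.List.pyRange 0 ((ys.length : Int) - 1) 1).map
      (fun i => String.ofList (PySem.List.slice ys (some i) (some (i + 2)))) = pvWindows ys := by
  rw [PySem.List.pyRange_one, List.map_map, ← pvMapRange_eq_windows]
  have hcount : (((ys.length : Int) - 1) - 0).toNat = ys.length - 1 := by omega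
  rw [hcount]
  apply List.map_congr_left
  intro k _
  have h1 : (0 : Int) + (k : Int) = ((k : Nat) : Int) := by ring
  have h2 : (k : Int) + 2 = ((k + 2 : Nat) : Int) := by push_cast; ring
  simp only [Function.comp_apply, h1, h2, PySem.List.slice_natCast]
  congr 2
  omega

theorem pvWindows_snoc (cs : List Char) (x : Char) (h : cs ≠ []) :
    pvWindows (cs ++ [x]) = pvWindows cs ++ [String.ofList [cs.getLast h, x]] := by
  induction cs with
  | nil => exact absurd rfl h
  | cons c t ih =>
    cases t with
    | nil => simp [pvWindows]
    | cons d r =>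
      have := ih (by simp)
      simp only [List.cons_append] at this ⊢
      rw [pvWindows, this, pvWindows]
      simp [List.getLast_cons]

theorem pvDropLast_eq (cs : List Char) (h : cs ≠ []) :
    cs.drop (cs.length - 1) = [cs.getLast h] := by
  induction cs with
  | nil => exact absurd rfl h
  | cons c t ih =>
    cases t with
    | nil => simp
    | cons d r =>
      have := ih (by simp)
      simpa [List.getLast_cons] using this

/-- B's accumulator loop, closed and flushed, is the bigram windows of the padded list. -/
theorem pvFold_eq_windows (cs : List Char) (acc : List String) (prev : Char) :
    (cs.foldl (fun (st : List String × Char) ch => (st.1 ++ [String.ofList [st.2, ch]], ch)) (acc, prev)).1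
      ++ [String.ofList [(cs.foldl (fun (st : List String × Char) ch => (st.1 ++ [String.ofList [st.2, ch]], ch)) (acc, prev)).2, '_']]
    = acc ++ pvWindows (prev :: cs ++ ['_']) := by
  induction cs generalizing acc prev with
  | nil => simp [pvWindows]
  | cons c t ih =>
    simp only [List.foldl_cons]
    rw [ih]
    show (acc ++ [String.ofList [prev, c]]) ++ pvWindows (c :: t ++ ['_'])
        = acc ++ pvWindows (prev :: c :: (t ++ ['_']))
    rw [pvWindows]
    simp

-- ===== VERDICT (by name: the statement is the Claim_ definition above) =====
theorem bi_symbols_spec : Claim_equal_bi_symbols := by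
  intro string _
  unfold Spec_bi_symbols bi_symbols bi_symbols_alt
  by_cases h : string.toList = []
  · simp [h]
  · simp only [h, if_false]
    obtain ⟨c, t, hct⟩ : ∃ c t, string.toList = c :: t := by
      cases hs : string.toList with
      | nil => exact absurd hs h
      | cons c t => exact ⟨c, t, rfl⟩
    rw [hct]
    -- B side: the accumulator pass is the windows of the padded list
    rw [pvFold_eq_windows (c :: t) [] '^']
    -- A side: turn the foldl into init ++ map, then into windows
    rw [PySem.List.foldl_append_singleton_eq_map, pvSliceRange_eq_windows]
    have hne : (c :: t) ≠ [] := by simp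
    have hw : pvWindows ('^' :: (c :: t) ++ ['_'])
        = String.ofList ['^', c] :: (pvWindows (c :: t) ++ [String.ofList [(c :: t).getLast hne, '_']]) := by
      show pvWindows ('^' :: c :: (t ++ ['_'])) = _
      rw [pvWindows]
      congr 1
      exact pvWindows_snoc (c :: t) '_' hne
    rw [List.nil_append, hw]
    rw [PySem.List.slice_from_neg_one, pvDropLast_eq (c :: t) hne]
    simp [PySem.List.pyGetD_zero_cons]
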